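-- pv_equiv track=rewrite | github.com/zysszy/TreeGen | predict.py | cov
-- ===== SOURCE A (Python) =====
-- def getlistDeep_all(inputlist):
--     ne = []
--     count = 0
--     for p in inputlist:
--         if p == "^":
--             count -= 1
--             ne.append(count)
--         else:
--             ne.append(count)
--             count += 1
--     return ne
--
-- def cov(tree):
--     ans = " "
--     li = tree.split()
--     #for s in str:
--     deeplist = getlistDeep_all(li)
--     mp = {}
--     for i in range(len(li)):
--         if li[i] == "^":
--             now = deeplist[i]
--             li[i] = mp[now] + "^"
--         else:
--             mp[deeplist[i]] = li[i]
--         ans += " " + li[i]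
--     return ans.replace("  ", "")
-- ===== SOURCE B (Python) =====
-- def cov(tree):
--     # Stack-based rewrite: instead of a precomputed depth list plus a depth->token
--     # dict, keep the open tokens on a stack; '^' closes the most recent open token.
--     ans = " "
--     stack = []
--     for tok in tree.split():
--         if tok == "^":
--             tok = stack.pop() + "^"
--         else:
--             stack.append(tok)
--         ans += " " + tok
--     return ans.replace("  ", "")
-- ===== Notes on version B (the rewrite author's own statement) =====
-- stated objective: simpler
-- what changed: Replaces A's separate depth-list pre-pass plus depth-keyed dict with a single walk keeping the currently-open tokens on a stack ('^' pops and closes the top); no depth list, no dict, no index loop.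
-- outside the precondition, e.g. on cov('^'): A raises KeyError, B raises IndexError
import Mathlib
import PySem

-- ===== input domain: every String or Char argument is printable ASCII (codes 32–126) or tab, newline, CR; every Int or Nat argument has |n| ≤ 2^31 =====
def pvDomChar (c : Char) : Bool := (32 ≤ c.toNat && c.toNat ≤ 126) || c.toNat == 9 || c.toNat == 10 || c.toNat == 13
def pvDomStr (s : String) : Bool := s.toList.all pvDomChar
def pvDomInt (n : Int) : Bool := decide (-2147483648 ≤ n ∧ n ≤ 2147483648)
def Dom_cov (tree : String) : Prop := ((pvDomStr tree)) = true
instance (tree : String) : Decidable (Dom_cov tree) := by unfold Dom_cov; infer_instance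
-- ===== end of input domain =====

-- B replaces A's depth-list pre-pass + depth-keyed dict by a single stack walk ('^' pops); simpler, same output.

-- ===== PORT A =====
-- getlistDeep_all: ne grows by append, count is the running depth
def getlistDeepAll (inputlist : List String) : List Int :=
  (inputlist.foldl (fun (s : List Int × Int) p =>
      if p = "^" then (s.1 ++ [s.2 - 1], s.2 - 1)
      else (s.1 ++ [s.2], s.2 + 1)) ([], 0)).1

-- one iteration of A's main loop; state = (mp, ans), pd = (li[i], deeplist[i]).
-- mp[now] on a missing key raises KeyError in Python: Pre_cov excludes exactly those
-- inputs, so the port's getD default "" is never taken under Pre_cov.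
def covStepA (s : PySem.Dict Int String × String) (pd : String × Int) :
    PySem.Dict Int String × String :=
  if pd.1 = "^" then (s.1, s.2 ++ " " ++ (s.1.getD pd.2 "" ++ "^"))
  else (s.1.insert pd.2 pd.1, s.2 ++ " " ++ pd.1)

-- A's 'for i in range(len(li))' reads li[i] and deeplist[i] in lockstep, so it is
-- ported as a fold over the zipped lists (exact: the write li[i] = mp[now] + "^" is
-- only read back at step i itself — later iterations never touch index i — so the
-- written value is bound directly and the list is not mutated).
def cov (tree : String) : String :=
  let li := PySem.Str.split₀ tree
  let deeplist := getlistDeepAll li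
  let st := (li.zip deeplist).foldl covStepA (PySem.Dict.empty, " ")
  PySem.Str.replace st.2 "  " ""

-- ===== PORT B =====
-- one iteration of B's loop; state = (stack, ans). stack.pop() on an empty stack
-- raises IndexError in Python: outside Pre_cov; the [] branch is never taken under Pre_cov.
def covStepB (s : List String × String) (tok : String) : List String × String :=
  if tok = "^" then
    match s.1 with
    | t :: rest => (rest, s.2 ++ " " ++ (t ++ "^"))
    | [] => ([], s.2 ++ " " ++ "^")
  else (tok :: s.1, s.2 ++ " " ++ tok)

def cov_alt (tree : String) : String :=
  let st := (PySem.Str.split₀ tree).foldl covStepB ([], " ")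
  PySem.Str.replace st.2 "  " ""

-- ===== PRECONDITION & SPEC =====
-- Pre_cov excludes exactly the inputs on which A raises KeyError (a '^' token that
-- closes more subtrees than were opened before it); B raises IndexError there.
def Pre_cov (tree : String) : Prop :=
  ∀ i : Nat, i < (PySem.Str.split₀ tree).length →
    (PySem.Str.split₀ tree).getD i "" = "^" →
    (2 * (((PySem.Str.split₀ tree).take i).count "^" : Int) < (i : Int))
instance (tree : String) : Decidable (Pre_cov tree) := by unfold Pre_cov; infer_instance

def pvWitness_cov : String := "x y ^ ^ z ^"

def Spec_cov (tree : String) (out : String) : Prop := out = cov_alt tree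
instance (tree : String) (out : String) : Decidable (Spec_cov tree out) := by unfold Spec_cov; infer_instance

-- ===== CLAIM (what is proved, stated in full; the proofs are below) =====
def Claim_equal_cov : Prop := ∀ (tree : String), Dom_cov tree → Pre_cov tree → Spec_cov tree (cov tree)

-- ===== LEMMAS AND PROOFS =====

-- the depth list as a structural recursion with a running count
def deepFrom : Int → List String → List Int
  | _, [] => []
  | c, p :: ps => if p = "^" then (c - 1) :: deepFrom (c - 1) ps else c :: deepFrom (c + 1) ps

theorem foldDeep (l : List String) : ∀ (acc : List Int) (c : Int),
    (l.foldl (fun (s : List Int × Int) p =>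
      if p = "^" then (s.1 ++ [s.2 - 1], s.2 - 1)
      else (s.1 ++ [s.2], s.2 + 1)) (acc, c)).1 = acc ++ deepFrom c l := by
  induction l with
  | nil => intro acc c; simp [deepFrom]
  | cons p ps ih =>
    intro acc c
    by_cases hp : p = "^" <;> simp [hp, deepFrom, ih]

theorem getlistDeepAll_eq (l : List String) : getlistDeepAll l = deepFrom 0 l := by
  simpa [getlistDeepAll] using foldDeep l [] 0

-- '^' never closes below depth 0, phrased structurally
def okTree : Int → List String → Prop
  | _, [] => True
  | c, p :: ps => if p = "^" then 0 < c ∧ okTree (c - 1) ps else okTree (c + 1) ps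

theorem pre_ok (l : List String) : ∀ (c : Int),
    (∀ i : Nat, i < l.length → l.getD i "" = "^" →
      (2 * ((l.take i).count "^" : Int) < c + (i : Int))) →
    okTree c l := by
  induction l with
  | nil => intro c _; trivial
  | cons p ps ih =>
    intro c h
    by_cases hp : p = "^"
    · simp only [okTree, hp, if_true]
      refine ⟨?_, ?_⟩
      · have := h 0 (by simp) (by simp [hp])
        simpa using this
      · apply ih
        intro i hi hv
        have := h (i + 1) (by simpa using Nat.succ_lt_succ hi) (by simpa using hv)
        simp [hp] at this ⊢
        omega
    · simp only [okTree, hp, if_false]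
      apply ih
      intro i hi hv
      have := h (i + 1) (by simpa using Nat.succ_lt_succ hi) (by simpa using hv)
      simp [hp] at this ⊢
      omega

theorem stackInv (l : List String) : ∀ (c : Int) (mp : PySem.Dict Int String)
    (stack : List String) (ans : String),
    okTree c l →
    c = (stack.length : Int) →
    (∀ d : Nat, d < stack.length →
      mp.get? (d : Int) = some (stack.getD (stack.length - 1 - d) "")) →
    ((l.zip (deepFrom c l)).foldl covStepA (mp, ans)).2 =
      (l.foldl covStepB (stack, ans)).2 := by
  induction l with
  | nil => intro c mp stack ans _ _ _; rfl
  | cons p ps ih =>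
    intro c mp stack ans hok hc hinv
    by_cases hp : p = "^"
    · have hok' : 0 < c ∧ okTree (c - 1) ps := by simpa [okTree, hp] using hok
      obtain ⟨hc0, hok2⟩ := hok'
      cases stack with
      | nil => simp at hc; omega
      | cons t rest =>
        have hlen : c = (rest.length : Int) + 1 := by simp at hc; omega
        have hget : mp.get? ((rest.length : Nat) : Int) = some t := by
          have := hinv rest.length (by simp)
          simpa using this
        have hgetD : mp.getD (c - 1) "" = t := by
          have hkey : c - 1 = ((rest.length : Nat) : Int) := by omega
          rw [hkey, PySem.Dict.getD_eq_get?_getD, hget]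
          rfl
        simp only [deepFrom, hp, if_true, List.zip_cons_cons, List.foldl_cons,
          covStepA, covStepB]
        simp only [hgetD]
        apply ih (c - 1) mp rest _ hok2 (by omega)
        intro d hd
        have hd' : d < (t :: rest).length := by simp; omega
        have := hinv d hd'
        have hidx : (t :: rest).length - 1 - d = (rest.length - 1 - d) + 1 := by
          simp; omega
        rw [hidx] at this
        simpa using this
    · have hok2 : okTree (c + 1) ps := by simpa [okTree, hp] using hok
      simp only [deepFrom, hp, if_false, List.zip_cons_cons, List.foldl_cons,
        covStepA, covStepB]
      apply ih (c + 1) (mp.insert c p) (p :: stack) _ hok2 (by simp; omega)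
      intro d hd
      by_cases hdn : d = stack.length
      · subst hdn
        have hkey : ((stack.length : Nat) : Int) = c := by omega
        rw [hkey, PySem.Dict.get?_insert_self]
        simp
      · have hd2 : d < stack.length := by simp at hd; omega
        have hne : ((d : Nat) : Int) ≠ c := by
          intro hcontra
          apply hdn
          omega
        rw [PySem.Dict.get?_insert_of_ne _ _ hne]
        have := hinv d hd2
        have hidx : (p :: stack).length - 1 - d = (stack.length - 1 - d) + 1 := by
          simp; omega
        rw [hidx]
        simpa using this

-- ===== VERDICT (by name: the statement is the Claim_ definition above) =====
theorem cov_spec : Claim_equal_cov := by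
  intro tree _ hpre
  unfold Spec_cov
  simp only [cov, cov_alt]
  rw [getlistDeepAll_eq]
  refine congrArg (fun s => PySem.Str.replace s "  " "") ?_
  apply stackInv _ 0 PySem.Dict.empty [] " "
  · apply pre_ok
    intro i hi hv
    have := hpre i hi hv
    omega
  · simp
  · intro d hd; simp at hd
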